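-- pv_equiv track=rewrite | github.com/zyskarch/pytestarch | src/pytestarch/importer/import_types.py | _get_parent_modules
-- ===== SOURCE A (Python) =====
-- from typing import Optional, List
--
-- def _get_parent_modules(module: str) -> List[str]:
--     """Calculates all parent modules of a given module.
--
--     Example: source root is a
--     module: a.b.c
--     returned: [a, a.b]
--
--     Args:
--         module: module to calculate parent modules for
--
--     Returns:
--         List of all parent modules, containing their full names up to the source code root.
--     """
--     parent_modules = []
--
--     parent: List[str] = []
--
--     for char in module:
--         if char == ".":
--             parent_modules.append("".join(parent))
--
--         parent.append(char)
--
--     return parent_modules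
-- ===== SOURCE B (Python) =====
-- from typing import List
--
--
-- def _get_parent_modules(module: str) -> List[str]:
--     parts = module.split(".")
--     return [".".join(parts[:i]) for i in range(1, len(parts))]
-- ===== Notes on version B (the rewrite author's own statement) =====
-- stated objective: idiomatic
-- what changed: Replaces the character-by-character scan with a running prefix list (a join at every dot) by a single split on the dot separator followed by a comprehension joining token prefixes.
import Mathlib
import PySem

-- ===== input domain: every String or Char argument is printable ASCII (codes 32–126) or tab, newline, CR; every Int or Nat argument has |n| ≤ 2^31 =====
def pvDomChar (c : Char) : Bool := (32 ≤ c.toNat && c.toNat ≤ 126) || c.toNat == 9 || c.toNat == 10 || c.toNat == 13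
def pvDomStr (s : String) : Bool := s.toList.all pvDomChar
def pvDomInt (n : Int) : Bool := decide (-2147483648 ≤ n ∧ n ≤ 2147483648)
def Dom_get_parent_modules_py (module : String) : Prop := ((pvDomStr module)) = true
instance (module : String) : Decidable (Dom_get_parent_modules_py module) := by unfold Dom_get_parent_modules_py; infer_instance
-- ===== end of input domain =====

-- B replaces A's character-by-character scan (running prefix emitted at each dot) by the
-- idiomatic split('.') + join of token prefixes; equal output proved on all strings.


-- ===== PORT A =====
-- Python keeps `parent` as a list of 1-char strings; here it is the same chars as List Char,
-- so `"".join(parent)` is exactly `String.mk parent`.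
def get_parent_modules_py (module : String) : List String :=
  (module.toList.foldl
    (fun (st : List String × List Char) c =>
      ((if c = '.' then st.1 ++ [String.mk st.2] else st.1), st.2 ++ [c]))
    ([], [])).1

-- ===== PORT B =====
def get_parent_modules_py_alt (module : String) : List String :=
  let parts := PySem.Chars.splitOn module.toList ['.']
  (PySem.List.pyRange 1 (parts.length : Int) 1).map
    (fun i => String.mk (PySem.Chars.join ['.'] (PySem.List.slice parts none (some i))))

-- ===== PRECONDITION & SPEC =====
def Spec_get_parent_modules_py (module : String) (out : List String) : Prop := out = get_parent_modules_py_alt module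
instance (module : String) (out : List String) : Decidable (Spec_get_parent_modules_py module out) := by unfold Spec_get_parent_modules_py; infer_instance

-- ===== CLAIM (what is proved, stated in full; the proofs are below) =====
def Claim_equal_get_parent_modules_py : Prop := ∀ (module : String), Dom_get_parent_modules_py module → Spec_get_parent_modules_py module (get_parent_modules_py module)

-- ===== LEMMAS AND PROOFS =====

-- structural single-char split: first segment and the remaining segments
def pvSplit : List Char → List Char × List (List Char)
  | [] => ([], [])
  | c :: cs =>
    let p := pvSplit cs
    if c = '.' then ([], p.1 :: p.2) else (c :: p.1, p.2)

-- A's emitted list, structurally: prefix `pre` grows; emit String.mk pre at each dot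
def pvAspec : List Char → List Char → List String
  | [], _ => []
  | c :: cs, pre => (if c = '.' then [String.mk pre] else []) ++ pvAspec cs (pre ++ [c])

theorem pvA_foldl (cs : List Char) (res : List String) (pre : List Char) :
    (cs.foldl
      (fun (st : List String × List Char) c =>
        ((if c = '.' then st.1 ++ [String.mk st.2] else st.1), st.2 ++ [c]))
      (res, pre)).1 = res ++ pvAspec cs pre := by
  induction cs generalizing res pre with
  | nil => simp [pvAspec]
  | cons c cs ih =>
    by_cases h : c = '.' <;> simp [pvAspec, h, ih, List.append_assoc]

theorem pvGo_char (cs : List Char) (fuel : Nat) (cur : List Char) (acc : List (List Char))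
    (h : cs.length ≤ fuel) :
    PySem.Chars.splitOn.go ['.'] fuel cs cur acc
      = acc.reverse ++ (cur.reverse ++ (pvSplit cs).1) :: (pvSplit cs).2 := by
  induction cs generalizing fuel cur acc with
  | nil =>
    cases fuel <;> rw [PySem.Chars.splitOn.go.eq_def] <;> simp [pvSplit]
  | cons c cs ih =>
    cases fuel with
    | zero => simp at h
    | succ fuel =>
      rw [PySem.Chars.splitOn.go.eq_def]
      by_cases hc : c = '.'
      · subst hc
        have hpre : List.isPrefixOf ['.'] ('.' :: cs) = true := by
          simp [List.isPrefixOf]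
        simp only [hpre, if_pos, List.length_cons, List.length_nil, Nat.zero_add,
          List.drop_succ_cons, List.drop_zero]
        rw [ih fuel [] (cur.reverse :: acc) (by simpa using Nat.le_of_succ_le_succ h)]
        simp [pvSplit]
      · have hpre : List.isPrefixOf ['.'] (c :: cs) = false := by
          simp only [List.isPrefixOf, Bool.and_true, beq_eq_false_iff_ne, ne_eq]
          exact fun h' => hc h'.symm
        simp only [hpre, Bool.false_eq_true, if_false]
        rw [ih fuel (c :: cur) acc (by simpa using Nat.le_of_succ_le_succ h)]
        simp [pvSplit, hc]

theorem pvSplitOn_char (cs : List Char) :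
    PySem.Chars.splitOn cs ['.'] = (pvSplit cs).1 :: (pvSplit cs).2 := by
  unfold PySem.Chars.splitOn
  rw [pvGo_char cs (cs.length + 1) [] [] (by omega)]
  simp

theorem pvJoin_cons (c : Char) (f : List Char) (t : List (List Char)) :
    PySem.Chars.join ['.'] ((c :: f) :: t) = c :: PySem.Chars.join ['.'] (f :: t) := by
  cases t with
  | nil => simp [PySem.Chars.join, List.intercalate]
  | cons q rest => rw [PySem.Chars.join_cons_cons, PySem.Chars.join_cons_cons]; simp

theorem pvMain (cs : List Char) (pre : List Char) :
    pvAspec cs pre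
      = (List.range (pvSplit cs).2.length).map
          (fun j => String.mk (pre ++ PySem.Chars.join ['.']
            (((pvSplit cs).1 :: (pvSplit cs).2).take (j + 1)))) := by
  induction cs generalizing pre with
  | nil => simp [pvAspec, pvSplit]
  | cons c cs ih =>
    by_cases hc : c = '.'
    · subst hc
      have hsp : pvSplit ('.' :: cs) = ([], (pvSplit cs).1 :: (pvSplit cs).2) := by
        simp [pvSplit]
      rw [pvAspec, hsp]
      simp only [List.length_cons, List.range_succ_eq_map, List.map_cons, List.map_map,
        if_true, List.singleton_append]
      congr 1
      · simp [PySem.Chars.join, List.intercalate]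
      · rw [ih (pre ++ ['.'])]
        refine List.map_congr_left ?_
        intro j hj
        simp only [Function.comp_apply]
        have ht : ((pvSplit cs).1 :: (pvSplit cs).2).take (j + 1)
            = (pvSplit cs).1 :: (pvSplit cs).2.take j := by simp
        have h2 : (([] : List Char) :: (pvSplit cs).1 :: (pvSplit cs).2).take (j + 1 + 1)
            = [] :: ((pvSplit cs).1 :: (pvSplit cs).2).take (j + 1) := by simp
        rw [h2, ht, PySem.Chars.join_cons_cons]
        simp
    · have hsp : pvSplit (c :: cs) = (c :: (pvSplit cs).1, (pvSplit cs).2) := by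
        simp [pvSplit, hc]
      rw [pvAspec, hsp]
      simp only [hc, ite_false]
      rw [List.nil_append, ih (pre ++ [c])]
      refine List.map_congr_left ?_
      intro j hj
      have ht : ((c :: (pvSplit cs).1) :: (pvSplit cs).2).take (j + 1)
          = (c :: (pvSplit cs).1) :: (pvSplit cs).2.take j := by simp
      have ht2 : ((pvSplit cs).1 :: (pvSplit cs).2).take (j + 1)
          = (pvSplit cs).1 :: (pvSplit cs).2.take j := by simp
      rw [ht, ht2, pvJoin_cons c _ _]
      simp

-- ===== VERDICT (by name: the statement is the Claim_ definition above) =====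
theorem get_parent_modules_py_spec : Claim_equal_get_parent_modules_py := by
  intro module _
  unfold Spec_get_parent_modules_py get_parent_modules_py
  rw [pvA_foldl, List.nil_append, pvMain module.toList []]
  simp only [get_parent_modules_py_alt, pvSplitOn_char, PySem.List.pyRange_one, List.map_map,
    List.length_cons, List.nil_append]
  have hn : ((((pvSplit module.toList).2.length + 1 : Nat) : Int) - 1).toNat
      = (pvSplit module.toList).2.length := by omega
  rw [hn]
  refine List.map_congr_left ?_
  intro j hj
  simp only [Function.comp_apply]
  rw [PySem.List.slice_to _ (by omega : (0:Int) ≤ 1 + (j:Nat))]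
  have h1 : ((1 : Int) + (j : Nat)).toNat = j + 1 := by omega
  rw [h1]
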